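-- pv_equiv track=rewrite | github.com/ntwrknrd/aoc-2025 | day06/solution.py | parse_worksheet_cephalopod
-- ===== SOURCE A (Python) =====
-- def find_problem_boundaries(lines: list[str]) -> list[tuple[int, int]]:
--     """Find where each problem starts and ends by looking for separator columns."""
--     # pad all lines to same width so we can scan columns cleanly
--     width = max(len(line) for line in lines)
--     padded = [line.ljust(width) for line in lines]
--
--     # a separator column is one where ALL rows are spaces
--     # we'll mark each column as True (separator) or False (part of a problem)
--     is_separator = []
--     for col in range(width):
--         all_spaces = all(row[col] == " " for row in padded)
--         is_separator.append(all_spaces)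
--
--     # now group consecutive non-separator columns into problem ranges
--     # each problem is a (start_col, end_col) tuple
--     problems = []
--     start = None
--     for col, sep in enumerate(is_separator):
--         if not sep and start is None:
--             # found the start of a new problem
--             start = col
--         elif sep and start is not None:
--             # found the end of a problem
--             problems.append((start, col))
--             start = None
--
--     # don't forget the last problem if it runs to the edge
--     if start is not None:
--         problems.append((start, width))
--
--     return problems
--
-- def parse_worksheet_cephalopod(lines: list[str]) -> list[tuple[list[int], str]]:
--     """Parse the worksheet cephalopod-style: digits in columns, read right-to-left."""
--     operator_row = lines[-1]
--     number_rows = lines[:-1]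
--
--     width = max(len(line) for line in lines)
--     padded_numbers = [row.ljust(width) for row in number_rows]
--     operator_row = operator_row.ljust(width)
--
--     problems = find_problem_boundaries(lines)
--
--     result = []
--     for start, end in problems:
--         # extract the rectangular chunk for this problem
--         chunks = [row[start:end] for row in padded_numbers]
--         chunk_width = end - start
--
--         # read columns right-to-left - each column of digits becomes one number
--         numbers = []
--         for col in range(chunk_width - 1, -1, -1):  # right to left
--             digits = ""
--             for row in chunks:
--                 char = row[col] if col < len(row) else " "
--                 if char.isdigit():
--                     digits += char
--             if digits:
--                 numbers.append(int(digits))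
--
--         op_chunk = operator_row[start:end].strip()
--         operator = op_chunk if op_chunk in "+*" else "+"
--
--         result.append((numbers, operator))
--
--     return result
-- ===== SOURCE B (Python) =====
-- def parse_worksheet_cephalopod(lines: list[str]) -> list[tuple[list[int], str]]:
--     """Column-major single pass: transpose the padded grid into columns and group
--     runs of non-blank columns, emitting each problem as its run is closed."""
--     width = max(len(line) for line in lines)
--     padded = [line.ljust(width) for line in lines]
--     cols = [''.join(row[i] for row in padded) for i in range(width)]
--
--     result = []
--     run = []  # current run of non-separator columns
--     for col in cols + [' ' * len(lines)]:  # sentinel blank column flushes the last run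
--         if col.strip(' '):
--             run.append(col)
--         elif run:
--             numbers = []
--             for c in reversed(run):
--                 digits = ''.join(ch for ch in c[:-1] if ch.isdigit())
--                 if digits:
--                     numbers.append(int(digits))
--             op = ''.join(c[-1] for c in run).strip()
--             result.append((numbers, op if op in "+*" else "+"))
--             run = []
--     return result
-- ===== Notes on version B (the rewrite author's own statement) =====
-- stated objective: alternative
-- what changed: B transposes the padded grid into columns once and emits each problem in a single left-to-right pass over runs of non-blank columns, instead of A's building a boundary table over column indices and then re-slicing every row per problem.
import Mathlib
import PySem

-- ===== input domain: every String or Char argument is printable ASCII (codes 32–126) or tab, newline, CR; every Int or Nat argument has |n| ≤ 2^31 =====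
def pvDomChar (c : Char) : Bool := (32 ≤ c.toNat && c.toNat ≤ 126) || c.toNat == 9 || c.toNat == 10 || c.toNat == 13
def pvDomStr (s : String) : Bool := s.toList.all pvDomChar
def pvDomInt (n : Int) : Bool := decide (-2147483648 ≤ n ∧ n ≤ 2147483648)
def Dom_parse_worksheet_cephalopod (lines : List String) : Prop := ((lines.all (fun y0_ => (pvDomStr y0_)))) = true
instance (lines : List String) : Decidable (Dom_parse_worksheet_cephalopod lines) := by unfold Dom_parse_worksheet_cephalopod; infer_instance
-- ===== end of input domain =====

-- B restructures A's worksheet parse as one column-major pass over the transposed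
-- grid (runs of non-blank columns) instead of a boundary table plus per-problem
-- row re-slicing; objective: alternative (same cost, different traversal).

-- ===== PORT A =====
-- shared builtins: str.ljust and max(len(l) for l in lines) (lengths are ≥ 0, so the 0-seeded running max is Python's max on a nonempty list)
def pvLjust (r : List Char) (w : Nat) : List Char := r ++ List.replicate (w - r.length) ' '
def pvMaxWidth (rows : List (List Char)) : Nat := rows.foldl (fun a r => max a r.length) 0

-- find_problem_boundaries(lines)
def pvBoundaries (rows : List (List Char)) : List (Int × Int) :=
  let width := pvMaxWidth rows
  let padded := rows.map (fun r => pvLjust r width)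
  -- col ∈ range width is in range for every padded row (length width), so row.getD col ' ' is row[col]
  let is_separator := (List.range width).map (fun col => padded.all (fun row => row.getD col ' ' == ' '))
  let st := (PySem.List.enumerate is_separator 0).foldl
    (fun (st : List (Int × Int) × Option Int) p =>
      if !p.2 && st.2.isNone then (st.1, some p.1)
      else if p.2 then
        match st.2 with
        | some s => (st.1 ++ [(s, p.1)], none)
        | none => st
      else st)
    ([], none)
  match st.2 with
  | some s => st.1 ++ [(s, (width : Int))]
  | none => st.1

def parse_worksheet_cephalopod (lines : List String) : List (List Int × String) :=
  match lines with
  | [] => []  -- Python A raises IndexError here (lines[-1]); excluded by Pre_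
  | _ :: _ =>
    let rows := lines.map String.toList
    let operator_row0 := rows.getLastD []          -- lines[-1]
    let number_rows := rows.dropLast              -- lines[:-1]
    let width := pvMaxWidth rows
    let padded_numbers := number_rows.map (fun r => pvLjust r width)
    let operator_row := pvLjust operator_row0 width
    let problems := pvBoundaries rows
    problems.foldl (fun result se =>
      let chunks := padded_numbers.map (fun r => PySem.List.slice r (some se.1) (some se.2))
      let chunk_width : Int := se.2 - se.1
      let numbers := (PySem.List.pyRange (chunk_width - 1) (-1) (-1)).foldl
        (fun numbers col =>
          let digits := chunks.foldl (fun digits row =>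
            -- char = row[col] if col < len(row) else " "  (col ≥ 0 here, so pyGet? is some under the guard)
            let ch := if col < (row.length : Int) then (PySem.List.pyGet? row col).getD ' ' else ' '
            if PySem.Chars.isdigit ch then digits ++ [ch] else digits) []
          -- int(digits): digits is a nonempty all-digit string, so ofChars? is some; getD 0 is dead
          if digits ≠ [] then numbers ++ [(PySem.Int.ofChars? digits).getD 0] else numbers) []
      let op_chunk := PySem.Chars.strip (PySem.List.slice operator_row (some se.1) (some se.2))
      let operator := if PySem.Chars.isIn op_chunk ['+', '*'] then op_chunk else ['+']
      result ++ [(numbers, String.ofList operator)]) []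

-- ===== PORT B =====
-- one problem from its run of columns (top-to-bottom column strings, last char = operator row)
def pvEmit (run : List (List Char)) : List Int × String :=
  let numbers := run.reverse.foldl (fun numbers c =>
    let digits := c.dropLast.filter PySem.Chars.isdigit
    if digits ≠ [] then numbers ++ [(PySem.Int.ofChars? digits).getD 0] else numbers) []
  let op := PySem.Chars.strip (run.map (fun c => (PySem.List.pyGet? c (-1)).getD ' '))
  (numbers, String.ofList (if PySem.Chars.isIn op ['+', '*'] then op else ['+']))

def parse_worksheet_cephalopod_alt (lines : List String) : List (List Int × String) :=
  match lines with
  | [] => []  -- B's Python raises ValueError here (max() of an empty sequence); excluded by Pre_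
  | _ :: _ =>
    let rows := lines.map String.toList
    let width := pvMaxWidth rows
    let padded := rows.map (fun r => pvLjust r width)
    -- cols = [''.join(row[i] for row in padded) for i in range(width)]; i < width = row.length, so getD is row[i]
    let cols := (List.range width).map (fun i => padded.map (fun r => r.getD i ' '))
    let st := (cols ++ [List.replicate lines.length ' ']).foldl
      (fun (st : List (List Int × String) × List (List Char)) col =>
        if PySem.Chars.stripChars col [' '] ≠ [] then (st.1, st.2 ++ [col])
        else if st.2 ≠ [] then (st.1 ++ [pvEmit st.2], [])
        else st)
      ([], [])
    st.1

-- ===== PRECONDITION & SPEC =====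
-- On [] Python A raises IndexError (lines[-1]) and B raises ValueError (max() of an empty sequence); [] is excluded.
def Pre_parse_worksheet_cephalopod (lines : List String) : Prop := lines ≠ []
instance (lines : List String) : Decidable (Pre_parse_worksheet_cephalopod lines) := by
  unfold Pre_parse_worksheet_cephalopod; infer_instance
def pvWitness_parse_worksheet_cephalopod : List String := ["12 34", " 5  6", "+   *"]

def Spec_parse_worksheet_cephalopod (lines : List String) (out : List (List Int × String)) : Prop := out = parse_worksheet_cephalopod_alt lines
instance (lines : List String) (out : List (List Int × String)) : Decidable (Spec_parse_worksheet_cephalopod lines out) := by unfold Spec_parse_worksheet_cephalopod; infer_instance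

-- ===== CLAIM (what is proved, stated in full; the proofs are below) =====
def Claim_equal_parse_worksheet_cephalopod : Prop := ∀ (lines : List String), Dom_parse_worksheet_cephalopod lines → Pre_parse_worksheet_cephalopod lines → Spec_parse_worksheet_cephalopod lines (parse_worksheet_cephalopod lines)

-- ===== LEMMAS AND PROOFS =====

-- a column is blank iff every character is a space
def pvBlank (c : List Char) : Bool := c.all (· == ' ')

-- maximal runs of non-blank columns, takeWhile/dropWhile normal form
def pvRunsTW : List (List Char) → List (List (List Char))
  | [] => []
  | c :: t =>
    if pvBlank c then pvRunsTW t
    else (c :: t.takeWhile (fun y => !pvBlank y)) :: pvRunsTW (t.dropWhile (fun y => !pvBlank y))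
termination_by l => l.length
decreasing_by
  · simp
  · have := List.length_dropWhile_le (fun y => !pvBlank y) t; simp; omega

-- accumulator form of B's grouping loop
def pvRunsFrom (run : List (List Char)) : List (List Char) → List (List (List Char))
  | [] => if run = [] then [] else [run]
  | c :: t =>
    if pvBlank c then (if run = [] then pvRunsFrom [] t else run :: pvRunsFrom [] t)
    else pvRunsFrom (run ++ [c]) t

-- A's interval list over the separator flags, absolute start offset k
def pvIntervals : List Bool → Int → List (Int × Int)
  | [], _ => []
  | true :: t, k => pvIntervals t (k + 1)
  | false :: t, k =>
    let L := (t.takeWhile (fun b => !b)).length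
    (k, k + 1 + (L : Int)) :: pvIntervals (t.dropWhile (fun b => !b)) (k + 1 + (L : Int))
termination_by flags _ => flags.length
decreasing_by
  · simp
  · have := List.length_dropWhile_le (fun b => !b) t; simp; omega

-- A's grouping step, literally the fold body of pvBoundaries
def pvStepA (st : List (Int × Int) × Option Int) (p : Int × Bool) : List (Int × Int) × Option Int :=
  if !p.2 && st.2.isNone then (st.1, some p.1)
  else if p.2 then
    match st.2 with
    | some s => (st.1 ++ [(s, p.1)], none)
    | none => st
  else st

-- A's fold over the enumerated flags followed by the final flush (flush bound = k + flags.length)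
def pvAfterA (flags : List Bool) (k : Int) (st : List (Int × Int) × Option Int) : List (Int × Int) :=
  let st' := (PySem.List.enumerate flags k).foldl pvStepA st
  match st'.2 with
  | some s => st'.1 ++ [(s, k + flags.length)]
  | none => st'.1

theorem pvAfterA_cons (b : Bool) (t : List Bool) (k : Int) (st : List (Int × Int) × Option Int) :
    pvAfterA (b :: t) k st = pvAfterA t (k + 1) (pvStepA st (k, b)) := by
  unfold pvAfterA
  rw [PySem.List.enumerate_cons, List.foldl_cons]
  rcases _h : (PySem.List.enumerate t (k + 1)).foldl pvStepA (pvStepA st (k, b)) with ⟨ps, s?⟩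
  cases s?
  · simp
  · simp
    ring_nf

-- joint loop invariant for A's grouping fold
theorem pvAfterA_inv (flags : List Bool) : ∀ (k : Int) (probs : List (Int × Int)),
    (pvAfterA flags k (probs, none) = probs ++ pvIntervals flags k) ∧
    (∀ s : Int, pvAfterA flags k (probs, some s) =
      probs ++ (s, k + ((flags.takeWhile (fun b => !b)).length : Int)) ::
        pvIntervals (flags.dropWhile (fun b => !b)) (k + ((flags.takeWhile (fun b => !b)).length : Int))) := by
  induction flags with
  | nil =>
    intro k probs
    refine ⟨?_, fun s => ?_⟩ <;>
      simp [pvAfterA, pvIntervals, PySem.List.enumerate_nil]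
  | cons b t ih =>
    intro k probs
    refine ⟨?_, fun s => ?_⟩
    · rw [pvAfterA_cons]
      cases b
      · have hs := (ih (k + 1) probs).2 k
        simp only [pvStepA] at hs ⊢
        simp only [pvIntervals]
        simpa using hs
      · have hn := (ih (k + 1) probs).1
        simp only [pvStepA] at hn ⊢
        simp only [pvIntervals]
        simpa using hn
    · rw [pvAfterA_cons]
      cases b
      · have hs := (ih (k + 1) probs).2 s
        simp only [pvStepA] at hs ⊢
        simp only [List.takeWhile, List.dropWhile, Bool.not_false]
        simp only [List.length_cons] at *
        simpa [add_assoc, add_comm, add_left_comm] using hs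
      · have hn := (ih (k + 1) (probs ++ [(s, k)])).1
        simp only [pvStepA] at hn ⊢
        simp only [List.takeWhile, List.dropWhile, Bool.not_true]
        simp only [pvIntervals]
        simpa using hn

theorem pvBoundaries_eq (rows : List (List Char)) :
    pvBoundaries rows = pvIntervals ((List.range (pvMaxWidth rows)).map (fun col =>
      (rows.map (fun r => pvLjust r (pvMaxWidth rows))).all (fun row => row.getD col ' ' == ' '))) 0 := by
  have h := (pvAfterA_inv ((List.range (pvMaxWidth rows)).map (fun col =>
      (rows.map (fun r => pvLjust r (pvMaxWidth rows))).all (fun row => row.getD col ' ' == ' '))) 0 []).1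
  unfold pvAfterA pvStepA at h
  simp only [List.length_map, List.length_range, zero_add, List.nil_append] at h
  unfold pvBoundaries
  simpa using h

-- every interval is inside [k, k + flags.length) with s < e
theorem pvIntervals_pos (flags : List Bool) (k : Int) :
    ∀ se ∈ pvIntervals flags k, k ≤ se.1 ∧ se.1 < se.2 ∧ se.2 ≤ k + flags.length := by
  induction flags, k using pvIntervals.induct with
  | case1 k => simp [pvIntervals]
  | case2 t k ih =>
    intro se hse
    have := ih se (by simpa [pvIntervals] using hse)
    simp only [List.length_cons]
    push_cast
    omega
  | case3 t k _L ih =>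
    intro se hse
    have hlen : (t.takeWhile (fun b => !b)).length + (t.dropWhile (fun b => !b)).length = t.length := by
      have h1 := congrArg List.length (List.takeWhile_append_dropWhile (p := fun b => !b) (l := t))
      rw [List.length_append] at h1
      exact h1
    simp only [pvIntervals, List.mem_cons] at hse
    rcases hse with h | h
    · subst h
      simp only [List.length_cons]
      push_cast
      omega
    · have := ih se h
      simp only [List.length_cons]
      push_cast
      push_cast at this
      omega

-- a stripped-of-spaces string is empty iff every character is a space
theorem pvStrip_empty (c : List Char) :
    (PySem.Chars.stripChars c [' '] = []) ↔ (c.all (· == ' ') = true) := by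
  have aux : ∀ (p : Char → Bool) (l : List Char),
      ((List.dropWhile p (List.dropWhile p l).reverse).reverse = []) ↔ ∀ x ∈ l, p x := by
    intro p l
    simp only [List.reverse_eq_nil_iff, List.dropWhile_eq_nil_iff, List.mem_reverse]
    constructor
    · intro h x hx
      rw [← List.takeWhile_append_dropWhile (p := p) (l := l), List.mem_append] at hx
      rcases hx with hx | hx
      · exact List.mem_takeWhile_imp hx
      · exact h x hx
    · intro h x hx
      exact h x (List.dropWhile_subset _ hx)
  unfold PySem.Chars.stripChars
  rw [aux]
  simp [List.all_eq_true]

-- B's grouping step, literally the fold body of parse_worksheet_cephalopod_alt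
def pvStepB (st : List (List Int × String) × List (List Char)) (col : List Char) :
    List (List Int × String) × List (List Char) :=
  if PySem.Chars.stripChars col [' '] ≠ [] then (st.1, st.2 ++ [col])
  else if st.2 ≠ [] then (st.1 ++ [pvEmit st.2], [])
  else st

theorem pvB_loop (cols : List (List Char)) (n : Nat) :
    ∀ (res : List (List Int × String)) (run : List (List Char)),
    ((cols ++ [List.replicate n ' ']).foldl pvStepB (res, run)).1 =
      res ++ (pvRunsFrom run cols).map pvEmit := by
  induction cols with
  | nil =>
    intro res run
    have hblank : PySem.Chars.stripChars (List.replicate n ' ') [' '] = [] := by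
      rw [pvStrip_empty]
      simp
    by_cases hr : run = [] <;>
      simp [pvStepB, pvRunsFrom, hblank, hr]
  | cons c t ih =>
    intro res run
    rw [List.cons_append, List.foldl_cons]
    by_cases hb : pvBlank c = true
    · have hc : PySem.Chars.stripChars c [' '] = [] := by
        rw [pvStrip_empty]; exact hb
      by_cases hr : run = []
      · have hst : pvStepB (res, run) c = (res, run) := by simp [pvStepB, hc, hr]
        rw [hst, ih, hr]
        simp [pvRunsFrom, hb]
      · have hst : pvStepB (res, run) c = (res ++ [pvEmit run], []) := by
          simp [pvStepB, hc, hr]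
        rw [hst, ih]
        simp [pvRunsFrom, hb, hr]
    · have hc : PySem.Chars.stripChars c [' '] ≠ [] := by
        rw [Ne, pvStrip_empty]; exact hb
      have hst : pvStepB (res, run) c = (res, run ++ [c]) := by simp [pvStepB, hc]
      rw [hst, ih]
      simp [pvRunsFrom, hb]

theorem pvRunsFrom_eq (cols : List (List Char)) : ∀ run : List (List Char),
    pvRunsFrom run cols =
      if run = [] then pvRunsTW cols
      else (run ++ cols.takeWhile (fun y => !pvBlank y)) ::
        pvRunsTW (cols.dropWhile (fun y => !pvBlank y)) := by
  induction cols with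
  | nil => intro run; by_cases hr : run = [] <;> simp [pvRunsFrom, pvRunsTW, hr]
  | cons c t ih =>
    intro run
    by_cases hb : pvBlank c = true
    · by_cases hr : run = [] <;>
        simp [pvRunsFrom, pvRunsTW, hb, hr, ih]
    · have h1 := ih (run ++ [c])
      have h2 := ih [c]
      by_cases hr : run = [] <;>
        simp [pvRunsFrom, pvRunsTW, hb, hr, h1, h2]

-- the intervals over the blank flags slice cols into exactly its non-blank runs
theorem pvIntervals_slice (cols : List (List Char)) : ∀ k : Int,
    (pvIntervals (cols.map pvBlank) k).map
      (fun se => (cols.drop (se.1 - k).toNat).take ((se.2 - se.1).toNat)) = pvRunsTW cols := by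
  induction cols using pvRunsTW.induct with
  | case1 => intro k; simp [pvIntervals, pvRunsTW]
  | case2 c t hb ih =>
    intro k
    have hflag : pvBlank c = true := hb
    rw [show pvRunsTW (c :: t) = pvRunsTW t by rw [pvRunsTW]; simp [hb]]
    rw [List.map_cons, hflag, show pvIntervals (true :: t.map pvBlank) k = pvIntervals (t.map pvBlank) (k + 1) by simp only [pvIntervals]]
    rw [← ih (k + 1)]
    apply List.map_congr_left
    intro se hse
    have hpos := pvIntervals_pos _ _ se hse
    have h1 : (se.1 - k).toNat = (se.1 - (k + 1)).toNat + 1 := by omega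
    rw [h1, List.drop_succ_cons]
  | case3 c t hb ih =>
    intro k
    have hflag : pvBlank c = false := by simpa using hb
    have htw : List.takeWhile (fun b => !b) (t.map pvBlank)
        = (t.takeWhile (fun y => !pvBlank y)).map pvBlank := by
      rw [List.takeWhile_map]; rfl
    have hdw : List.dropWhile (fun b => !b) (t.map pvBlank)
        = (t.dropWhile (fun y => !pvBlank y)).map pvBlank := by
      rw [List.dropWhile_map]; rfl
    have hsplit := List.takeWhile_append_dropWhile (p := fun y => !pvBlank y) (l := t)
    have hdropL : t.drop (t.takeWhile (fun y => !pvBlank y)).length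
        = t.dropWhile (fun y => !pvBlank y) := by
      have h2 := List.drop_left (l₁ := t.takeWhile (fun y => !pvBlank y))
        (l₂ := t.dropWhile (fun y => !pvBlank y))
      rw [hsplit] at h2
      exact h2
    rw [List.map_cons, hflag]
    rw [show pvIntervals (false :: t.map pvBlank) k
        = (k, k + 1 + ((List.takeWhile (fun b => !b) (t.map pvBlank)).length : Int)) ::
          pvIntervals (List.dropWhile (fun b => !b) (t.map pvBlank))
            (k + 1 + ((List.takeWhile (fun b => !b) (t.map pvBlank)).length : Int)) by
          simp only [pvIntervals]]
    rw [htw, hdw, List.length_map, List.map_cons]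
    rw [pvRunsTW]
    rw [if_neg (by simp [hflag])]
    congr 1
    · -- head run
      have h1 : ((k : Int) - k).toNat = 0 := by omega
      have h2 : ((k + 1 + ((t.takeWhile (fun y => !pvBlank y)).length : Int)) - k).toNat
          = (t.takeWhile (fun y => !pvBlank y)).length + 1 := by omega
      rw [h1, h2, List.drop_zero, List.take_succ_cons]
      congr 1
      obtain ⟨u, hu⟩ := List.takeWhile_prefix (l := t) (fun y => !pvBlank y)
      have h3 := List.take_left (l₁ := t.takeWhile (fun y => !pvBlank y)) (l₂ := u)
      rw [hu] at h3
      exact h3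
    · rw [← ih (k + 1 + ((t.takeWhile (fun y => !pvBlank y)).length : Int))]
      apply List.map_congr_left
      intro se hse
      have hpos := pvIntervals_pos _ _ se hse
      rw [List.length_map] at hpos
      have h1 : (se.1 - k).toNat
          = ((t.takeWhile (fun y => !pvBlank y)).length + 1)
            + (se.1 - (k + 1 + ((t.takeWhile (fun y => !pvBlank y)).length : Int))).toNat := by
        omega
      rw [h1]
      congr 1
      have hstep : (c :: t).drop ((t.takeWhile (fun y => !pvBlank y)).length + 1)
          = t.dropWhile (fun y => !pvBlank y) := by
        rw [List.drop_succ_cons]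
        exact hdropL
      have h4 := congrArg
        (List.drop (se.1 - (k + 1 + ((t.takeWhile (fun y => !pvBlank y)).length : Int))).toNat) hstep
      rw [List.drop_drop] at h4
      exact h4

-- append-only folds are maps
theorem pvFoldl_map {α β : Type} (f : α → β) (l : List α) (init : List β) :
    l.foldl (fun r x => r ++ [f x]) init = init ++ l.map f := by
  induction l generalizing init with
  | nil => simp
  | cons x t ih => simp [List.foldl_cons, ih]

theorem pvFoldl_num {α : Type} (D : α → List Char) (l : List α) (init : List Int) :
    l.foldl (fun acc x => if D x ≠ [] then acc ++ [(PySem.Int.ofChars? (D x)).getD 0] else acc) init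
      = init ++ (((l.map D).filter (fun d => !d.isEmpty)).map (fun d => (PySem.Int.ofChars? d).getD 0)) := by
  induction l generalizing init with
  | nil => simp
  | cons x t ih =>
    simp only [List.foldl_cons, List.map_cons, List.filter_cons, ih]
    by_cases h : D x = [] <;> simp [h]

theorem pvFoldl_dig {α : Type} (f : α → Char) (l : List α) (init : List Char) :
    l.foldl (fun d row => if PySem.Chars.isdigit (f row) then d ++ [f row] else d) init
      = init ++ ((l.map f).filter PySem.Chars.isdigit) := by
  induction l generalizing init with
  | nil => simp
  | cons x t ih =>
    simp only [List.foldl_cons, List.map_cons, List.filter_cons, ih]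
    by_cases h : PySem.Chars.isdigit (f x) <;> simp [h]

-- c[-1] on a nonempty list
theorem pvGet_neg_one (c : List Char) (h : c ≠ []) :
    (PySem.List.pyGet? c (-1)).getD ' ' = c.getD (c.length - 1) ' ' := by
  have hl : 0 < c.length := List.length_pos_iff.mpr h
  rw [PySem.List.pyGet?, PySem.List.pyIdx?]
  rw [if_neg (by omega), if_pos (by omega)]
  simp [List.getD, List.getElem?_eq_getElem (by omega : c.length - 1 < c.length)]

-- A's per-problem extraction (the body of A's outer fold), let-free copy
def pvExtractA (pn : List (List Char)) (opr : List Char) (s e : Int) : List Int × String :=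
  let chunks := pn.map (fun r => PySem.List.slice r (some s) (some e))
  let numbers := (PySem.List.pyRange (e - s - 1) (-1) (-1)).foldl
    (fun numbers col =>
      let digits := chunks.foldl (fun digits row =>
        let ch := if col < (row.length : Int) then (PySem.List.pyGet? row col).getD ' ' else ' '
        if PySem.Chars.isdigit ch then digits ++ [ch] else digits) []
      if digits ≠ [] then numbers ++ [(PySem.Int.ofChars? digits).getD 0] else numbers) []
  let op_chunk := PySem.Chars.strip (PySem.List.slice opr (some s) (some e))
  let operator := if PySem.Chars.isIn op_chunk ['+', '*'] then op_chunk else ['+']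
  (numbers, String.ofList operator)

-- the heart: A's extraction at interval (s,e) is B's emit on the matching run of columns
theorem pvExtract_eq
    (padded : List (List Char)) (width : Nat)
    (pn : List (List Char)) (opr : List Char)
    (hsplit : padded = pn ++ [opr])
    (hlen : ∀ p ∈ padded, p.length = width)
    (s e : Int) (hs : 0 ≤ s) (hse : s < e) (he : e ≤ (width : Int)) :
    pvExtractA pn opr s e =
      pvEmit ((((List.range width).map (fun i => padded.map (fun r => r.getD i ' '))).drop s.toNat).take ((e - s).toNat)) := by
  have hpadne : padded ≠ [] := by rw [hsplit]; simp
  have hopr : opr.length = width := hlen opr (by rw [hsplit]; exact List.mem_append_right _ (by simp))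
  have hrun : ((((List.range width).map (fun i => padded.map (fun r => r.getD i ' '))).drop s.toNat).take ((e - s).toNat))
      = (List.range ((e - s).toNat)).map (fun j => padded.map (fun r => r.getD (s.toNat + j) ' ')) := by
    apply List.ext_getElem
    · simp
      omega
    · intro i h1 h2
      simp only [List.getElem_take, List.getElem_drop, List.getElem_map, List.getElem_range]
  rw [hrun]
  unfold pvExtractA pvEmit
  simp only []
  rw [Prod.mk.injEq]
  constructor
  · -- the numbers component
    rw [pvFoldl_num (fun col => (pn.map (fun r => PySem.List.slice r (some s) (some e))).foldl
        (fun digits row =>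
          if PySem.Chars.isdigit (if col < (row.length : Int) then (PySem.List.pyGet? row col).getD ' ' else ' ')
          then digits ++ [if col < (row.length : Int) then (PySem.List.pyGet? row col).getD ' ' else ' ']
          else digits) []) (PySem.List.pyRange (e - s - 1) (-1) (-1)) []]
    rw [pvFoldl_num (fun c => c.dropLast.filter PySem.Chars.isdigit)
        ((List.range ((e - s).toNat)).map (fun j => padded.map (fun r => r.getD (s.toNat + j) ' '))).reverse []]
    suffices h : (PySem.List.pyRange (e - s - 1) (-1) (-1)).map (fun col =>
        (pn.map (fun r => PySem.List.slice r (some s) (some e))).foldl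
          (fun digits row =>
            if PySem.Chars.isdigit (if col < (row.length : Int) then (PySem.List.pyGet? row col).getD ' ' else ' ')
            then digits ++ [if col < (row.length : Int) then (PySem.List.pyGet? row col).getD ' ' else ' ']
            else digits) [])
        = ((List.range ((e - s).toNat)).map (fun j => padded.map (fun r => r.getD (s.toNat + j) ' '))).reverse.map
            (fun c => c.dropLast.filter PySem.Chars.isdigit) by
      rw [h]
    rw [PySem.List.pyRange_neg_one]
    rw [show e - s - 1 - (-1) = e - s by ring]
    rw [← List.map_reverse, List.range_eq_range', List.reverse_range', List.map_map, List.map_map, List.map_map, ← List.range_eq_range']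
    apply List.map_congr_left
    intro k hk
    rw [List.mem_range] at hk
    simp only [Function.comp_apply]
    -- inner digit fold on the A side
    rw [pvFoldl_dig (fun row =>
        if (e - s - 1 - (k : Int)) < (row.length : Int) then (PySem.List.pyGet? row (e - s - 1 - (k : Int))).getD ' ' else ' ')
      (pn.map (fun r => PySem.List.slice r (some s) (some e))) []]
    -- B side: the column's number part is pn's characters at the same position
    rw [← List.map_dropLast, hsplit, List.dropLast_concat, List.nil_append, List.map_map]
    congr 1
    apply List.map_congr_left
    intro r hr
    have hrw : r.length = width := hlen r (by rw [hsplit]; exact List.mem_append_left _ hr)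
    have hslice : PySem.List.slice r (some s) (some e) = (r.drop s.toNat).take (e.toNat - s.toNat) :=
      PySem.List.slice_toNat r hs (by omega)
    have hlrow : ((r.drop s.toNat).take (e.toNat - s.toNat)).length = (e - s).toNat := by
      simp
      omega
    simp only [Function.comp_apply, hslice]
    rw [if_pos (by rw [hlrow]; omega :
      e - s - 1 - (k : Int) < (((r.drop s.toNat).take (e.toNat - s.toNat)).length : Int))]
    rw [show e - s - 1 - (k : Int) = (((e - s).toNat - 1 - k : Nat) : Int) by omega]
    rw [PySem.List.pyGet?_natCast]
    have hidx : (e - s).toNat - 1 - k < ((r.drop s.toNat).take (e.toNat - s.toNat)).length := by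
      rw [hlrow]; omega
    rw [List.getElem?_eq_getElem hidx]
    rw [List.getElem_take, List.getElem_drop]
    rw [Option.getD_some]
    rw [List.getD_eq_getElem r ' ' (by omega : s.toNat + (0 + (e - s).toNat - 1 - k) < r.length)]
    congr 1
    omega
  · -- the operator component
    have hop : PySem.List.slice opr (some s) (some e)
        = ((List.range ((e - s).toNat)).map (fun j => padded.map (fun r => r.getD (s.toNat + j) ' '))).map
            (fun c => (PySem.List.pyGet? c (-1)).getD ' ') := by
      rw [PySem.List.slice_toNat opr hs (by omega)]
      apply List.ext_getElem
      · simp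
        omega
      · intro i h1 h2
        rw [List.getElem_take, List.getElem_drop, List.getElem_map, List.getElem_map, List.getElem_range]
        have hgne : padded.map (fun r => r.getD (s.toNat + i) ' ') ≠ [] := by simp [hpadne]
        rw [pvGet_neg_one _ hgne]
        have hplen : 0 < padded.length := List.length_pos_iff.mpr hpadne
        rw [List.length_map]
        rw [List.getD_eq_getElem _ ' '
          (by simp only [List.length_map]; omega :
            padded.length - 1 < (padded.map (fun r => r.getD (s.toNat + i) ' ')).length)]
        rw [List.getElem_map]
        have hA : padded.getLast? = some (padded.getLast hpadne) :=
          List.getLast?_eq_some_getLast hpadne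
        have hB : padded.getLast? = some opr := by
          rw [hsplit, List.getLast?_concat]
        have hlastv : padded.getLast hpadne = opr := by
          rw [hA] at hB
          exact Option.some.inj hB
        have hlast : padded[padded.length - 1]'(by omega) = opr := by
          rw [← hlastv, List.getLast_eq_getElem]
        rw [hlast]
        simp only [List.length_take, List.length_drop, List.length_map, List.length_range] at h1 h2
        rw [List.getD_eq_getElem opr ' ' (by omega : s.toNat + i < opr.length)]
    rw [hop]

-- ===== VERDICT (by name: the statement is the Claim_ definition above) =====
theorem parse_worksheet_cephalopod_spec : Claim_equal_parse_worksheet_cephalopod := by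
  intro lines _hdom hpre
  unfold Spec_parse_worksheet_cephalopod
  cases lines with
  | nil => exact absurd rfl hpre
  | cons l ls =>
    have hrowsne : (List.map String.toList (l :: ls)) ≠ [] := by simp
    show (pvBoundaries (List.map String.toList (l :: ls))).foldl
        (fun result se => result ++
          [pvExtractA
            ((List.map String.toList (l :: ls)).dropLast.map
              (fun r => pvLjust r (pvMaxWidth (List.map String.toList (l :: ls)))))
            (pvLjust ((List.map String.toList (l :: ls)).getLastD [])
              (pvMaxWidth (List.map String.toList (l :: ls)))) se.1 se.2]) []
      = (((List.range (pvMaxWidth (List.map String.toList (l :: ls)))).map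
            (fun i => ((List.map String.toList (l :: ls)).map
              (fun r => pvLjust r (pvMaxWidth (List.map String.toList (l :: ls))))).map
                (fun r => r.getD i ' ')) ++
          [List.replicate (l :: ls).length ' ']).foldl pvStepB ([], [])).1
    generalize hR : List.map String.toList (l :: ls) = ROWS at hrowsne ⊢
    generalize hW : pvMaxWidth ROWS = W
    set PN := ROWS.dropLast.map (fun r => pvLjust r W) with hPN
    set OPR := pvLjust (ROWS.getLastD []) W with hOPR
    set PAD := ROWS.map (fun r => pvLjust r W) with hPAD
    set COLS := (List.range W).map (fun i => PAD.map (fun r => r.getD i ' ')) with hCOLS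
    rw [pvB_loop, pvFoldl_map]
    simp only [List.nil_append]
    rw [pvRunsFrom_eq]
    simp only [if_true]
    rw [pvBoundaries_eq, hW]
    have hflags : (List.range W).map (fun col =>
        (ROWS.map (fun r => pvLjust r W)).all (fun row => row.getD col ' ' == ' '))
        = COLS.map pvBlank := by
      rw [hCOLS, List.map_map]
      apply List.map_congr_left
      intro i _
      simp [hPAD, pvBlank, List.all_map, Function.comp_def]
    rw [hflags]
    rw [← pvIntervals_slice COLS 0]
    conv_rhs => rw [List.map_map]
    apply List.map_congr_left
    intro se hse
    have hpos := pvIntervals_pos _ _ se hse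
    rw [hCOLS] at hpos
    simp only [List.length_map, List.length_range, zero_add] at hpos
    -- facts for pvExtract_eq
    have hlen : ∀ p ∈ PAD, p.length = W := by
      intro p hp
      rw [hPAD] at hp
      obtain ⟨r, hr, rfl⟩ := List.mem_map.mp hp
      have hle : r.length ≤ pvMaxWidth ROWS :=
        (PySem.List.le_foldl_max_nat ROWS List.length 0).2 r hr
      rw [hW] at hle
      simp [pvLjust]
      omega
    have hsplit : PAD = PN ++ [OPR] := by
      rw [hPAD, hPN, hOPR]
      have hgl : ROWS.getLastD [] = ROWS.getLast hrowsne := by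
        rw [List.getLastD_eq_getLast?, List.getLast?_eq_some_getLast hrowsne]
        rfl
      conv_lhs => rw [← List.dropLast_append_getLast hrowsne]
      rw [List.map_append, List.map_cons, List.map_nil, hgl]
    have hext := pvExtract_eq PAD W PN OPR hsplit hlen se.1 se.2
      (by omega) (by omega) (by omega)
    obtain ⟨s1, s2⟩ := se
    simp only [Function.comp, Int.sub_zero]
    rw [← hCOLS] at hext
    exact hext
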